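-- pv_equiv track=rewrite | github.com/chipi/podcast_scraper | src/podcast_scraper/search/corpus_scope.py | latest_feed_run_allowed_relpaths
-- ===== SOURCE A (Python) =====
-- from typing import Any, Iterable, List, Optional, Tuple
--
-- def feed_dir_and_run_segment_from_relpath(rel_posix: str) -> Tuple[Optional[str], Optional[str]]:
--     """Parse ``feeds/<feedDir>/run_<tag>/metadata/...`` into ``(feedDir, run_segment)``.
--
--     Returns ``(None, None)`` when *rel_posix* is not under that layout (flat corpus, other
--     trees, or ``feeds/...`` without a ``run_*`` segment before ``metadata/``).
--     """
--     rel = rel_posix.replace("\\", "/")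
--     parts = [p for p in rel.split("/") if p]
--     if len(parts) < 5 or parts[0] != "feeds":
--         return None, None
--     if parts[2].startswith("run_") and parts[3] == "metadata":
--         return parts[1], parts[2]
--     return None, None
--
-- def latest_run_segment_by_feed_dir(rel_posixes: Iterable[str]) -> dict[str, str]:
--     """Map ``feeds/<feedDir>/`` → greatest ``run_*`` directory name (lexicographic order)."""
--     latest: dict[str, str] = {}
--     for rel in rel_posixes:
--         feed_dir, run_seg = feed_dir_and_run_segment_from_relpath(rel.replace("\\", "/"))
--         if feed_dir is None or run_seg is None:
--             continue
--         cur = latest.get(feed_dir)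
--         if cur is None or run_seg > cur:
--             latest[feed_dir] = run_seg
--     return latest
--
-- def latest_feed_run_allowed_relpaths(rel_posixes: Iterable[str]) -> frozenset[str]:
--     """Relative paths to keep when a feed directory has multiple ``run_*`` children.
--
--     Under ``feeds/<feedDir>/run_*/metadata/``, only paths whose ``run_*`` equals the
--     lexicographic maximum for that ``feedDir`` are retained. All other relative paths
--     (flat ``metadata/``, ``search/``, etc.) are kept.
--     """
--     rels = [str(r).replace("\\", "/") for r in rel_posixes]
--     latest = latest_run_segment_by_feed_dir(rels)
--     kept: set[str] = set()
--     for rel in rels: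
--         feed_dir, run_seg = feed_dir_and_run_segment_from_relpath(rel)
--         if feed_dir is None:
--             kept.add(rel)
--             continue
--         want = latest.get(feed_dir)
--         if want is None:
--             kept.add(rel)
--             continue
--         if run_seg == want:
--             kept.add(rel)
--     return frozenset(kept)
-- ===== SOURCE B (Python) =====
-- def latest_feed_run_allowed_relpaths(rel_posixes):
--     """Keep a layout path unless some sibling dominates it (same feed dir, lexicographically
--     greater run_* segment); non-layout paths are always kept.  No latest-run map is built:
--     kept-ness is decided by a direct pairwise dominance test."""
--     rels = [str(r).replace("\\", "/") for r in rel_posixes]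
--
--     def layout(rel):
--         match [p for p in rel.split("/") if p]:
--             case ["feeds", fd, run, "metadata", _, *_] if run.startswith("run_"):
--                 return fd, run
--             case _:
--                 return None
--
--     layouts = [layout(rel) for rel in rels]
--     kept = set()
--     for rel, mine in zip(rels, layouts):
--         if mine is None or not any(
--             o is not None and o[0] == mine[0] and o[1] > mine[1] for o in layouts
--         ):
--             kept.add(rel)
--     return frozenset(kept)
-- ===== Notes on version B (the rewrite author's own statement) =====
-- stated objective: alternative
-- what changed: B builds no latest-run map at all: it parses each normalized path once with a list pattern match and keeps a layout path iff no other path dominates it (same feed dir, lexicographically greater run_* segment) via a direct pairwise any() dominance test, replacing A's running-max dict construction followed by a rescan with lookups.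
import Mathlib
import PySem

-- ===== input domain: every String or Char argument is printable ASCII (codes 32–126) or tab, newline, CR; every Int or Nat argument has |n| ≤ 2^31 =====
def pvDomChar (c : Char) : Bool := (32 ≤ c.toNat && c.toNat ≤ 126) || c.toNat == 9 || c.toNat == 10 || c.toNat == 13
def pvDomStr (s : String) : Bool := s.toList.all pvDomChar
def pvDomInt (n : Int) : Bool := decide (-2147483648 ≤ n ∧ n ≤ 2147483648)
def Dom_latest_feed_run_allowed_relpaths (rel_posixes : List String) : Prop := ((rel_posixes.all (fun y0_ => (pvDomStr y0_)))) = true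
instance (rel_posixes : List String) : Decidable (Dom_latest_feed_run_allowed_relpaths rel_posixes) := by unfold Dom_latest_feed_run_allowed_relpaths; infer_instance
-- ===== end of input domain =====

-- B builds no latest-run map: it parses each path once with a list pattern match and keeps a
-- layout path iff no other path dominates it (same feed dir, greater run_* segment) — a
-- pairwise dominance test instead of A's running-max dict plus rescan (alternative algorithm).

-- ===== PORT A =====
def feed_dir_and_run_segment_from_relpath (rel_posix : String) : Option (String × String) :=
  let rel := PySem.Str.replace rel_posix "\\" "/"
  let parts := ((PySem.Chars.splitOn rel.toList "/".toList).map String.ofList).filter (fun p => p ≠ "")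
  if parts.length < 5 ∨ parts.getD 0 "" ≠ "feeds" then none
  else if PySem.Str.startswith (parts.getD 2 "") "run_" ∧ parts.getD 3 "" = "metadata" then
    some (parts.getD 1 "", parts.getD 2 "")
  else none

def latest_run_segment_by_feed_dir (rel_posixes : List String) : PySem.Dict String String :=
  rel_posixes.foldl (fun latest rel =>
    match feed_dir_and_run_segment_from_relpath (PySem.Str.replace rel "\\" "/") with
    | none => latest
    | some (feed_dir, run_seg) =>
      match latest.get? feed_dir with
      | none => latest.insert feed_dir run_seg
      | some cur => if cur < run_seg then latest.insert feed_dir run_seg else latest)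
    PySem.Dict.empty

def latest_feed_run_allowed_relpaths (rel_posixes : List String) : List String :=
  let rels := rel_posixes.map (fun r => PySem.Str.replace r "\\" "/")
  let latest := latest_run_segment_by_feed_dir rels
  rels.foldl (fun kept rel =>
    match feed_dir_and_run_segment_from_relpath rel with
    | none => PySem.Set.add kept rel
    | some (feed_dir, run_seg) =>
      match latest.get? feed_dir with
      | none => PySem.Set.add kept rel
      | some want => if run_seg = want then PySem.Set.add kept rel else kept)
    (PySem.Set.empty : PySem.Set String)

-- ===== PORT B =====
-- Source B's `layout`: a match/case list pattern, ported as a Lean list pattern match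
def pvLayout (rel : String) : Option (String × String) :=
  match ((PySem.Chars.splitOn rel.toList "/".toList).map String.ofList).filter (fun p => p ≠ "") with
  | "feeds" :: fd :: run :: "metadata" :: _ :: _ =>
      if PySem.Str.startswith run "run_" then some (fd, run) else none
  | _ => none

def latest_feed_run_allowed_relpaths_alt (rel_posixes : List String) : List String :=
  let rels := rel_posixes.map (fun r => PySem.Str.replace r "\\" "/")
  let layouts := rels.map pvLayout
  (rels.zip layouts).foldl (fun kept rm =>
    match rm.2 with
    | none => PySem.Set.add kept rm.1
    | some m =>
      if layouts.any (fun o => match o with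
          | some p => p.1 == m.1 && m.2 < p.2
          | none => false)
      then kept else PySem.Set.add kept rm.1)
    (PySem.Set.empty : PySem.Set String)

-- ===== PRECONDITION & SPEC =====
def Spec_latest_feed_run_allowed_relpaths (rel_posixes : List String) (out : List String) : Prop := out = latest_feed_run_allowed_relpaths_alt rel_posixes
instance (rel_posixes : List String) (out : List String) : Decidable (Spec_latest_feed_run_allowed_relpaths rel_posixes out) := by unfold Spec_latest_feed_run_allowed_relpaths; infer_instance

-- ===== CLAIM (what is proved, stated in full; the proofs are below) =====
def Claim_equal_latest_feed_run_allowed_relpaths : Prop := ∀ (rel_posixes : List String), Dom_latest_feed_run_allowed_relpaths rel_posixes → Spec_latest_feed_run_allowed_relpaths rel_posixes (latest_feed_run_allowed_relpaths rel_posixes)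

-- ===== LEMMAS AND PROOFS =====

-- replacing '\' by '/' is substitution of single characters
def pvSub (c : Char) : Char := if c = '\\' then '/' else c

theorem pv_go_sub (fuel : Nat) (l acc : List Char) (h : l.length ≤ fuel) :
    PySem.Chars.replace.go ['\\'] ['/'] fuel l acc = acc.reverse ++ l.map pvSub := by
  induction fuel generalizing l acc with
  | zero =>
    have hl : l = [] := List.eq_nil_of_length_eq_zero (Nat.le_zero.mp h)
    subst hl; simp [PySem.Chars.replace.go]
  | succ n ih =>
    cases l with
    | nil => simp [PySem.Chars.replace.go]
    | cons c t =>
      simp only [PySem.Chars.replace.go]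
      by_cases hc : c = '\\'
      · subst hc
        rw [if_pos (by simp [List.isPrefixOf])]
        rw [ih _ _ (by simpa using Nat.le_of_succ_le_succ h)]
        simp [pvSub]
      · rw [if_neg (by simp [List.isPrefixOf]; exact fun hh => hc hh.symm)]
        rw [ih _ _ (by simpa using Nat.le_of_succ_le_succ h)]
        simp [pvSub, hc]

theorem pv_replace_eq_map (s : String) :
    (PySem.Str.replace s "\\" "/").toList = s.toList.map pvSub := by
  rw [PySem.Str.toList_replace]
  show PySem.Chars.replace s.toList ['\\'] ['/'] = _
  unfold PySem.Chars.replace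
  rw [if_neg (by simp)]
  simpa using pv_go_sub s.toList.length s.toList [] (le_refl _)

theorem pv_sub_idem (c : Char) : pvSub (pvSub c) = pvSub c := by
  unfold pvSub; split_ifs <;> simp_all

theorem pv_replace_idem (s : String) :
    PySem.Str.replace (PySem.Str.replace s "\\" "/") "\\" "/" = PySem.Str.replace s "\\" "/" := by
  apply String.toList_inj.mp
  rw [pv_replace_eq_map, pv_replace_eq_map, List.map_map]
  exact List.map_congr_left (fun c _ => pv_sub_idem c)

-- A's if-chain over the parts list equals B's list pattern match
theorem pv_body_eq (parts : List String) :
    (if parts.length < 5 ∨ parts.getD 0 "" ≠ "feeds" then none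
     else if PySem.Str.startswith (parts.getD 2 "") "run_" ∧ parts.getD 3 "" = "metadata" then
       some (parts.getD 1 "", parts.getD 2 "")
     else none)
    = (match parts with
       | "feeds" :: fd :: run :: "metadata" :: _ :: _ =>
           if PySem.Str.startswith run "run_" then some (fd, run) else none
       | _ => none) := by
  match parts with
  | [] => simp
  | [_] => simp
  | [_, _] => simp
  | [_, _, _] => simp
  | [_, _, _, _] => simp
  | a :: b :: c :: d :: e :: rest =>
    by_cases ha : a = "feeds"
    · subst ha
      by_cases hd : d = "metadata"
      · subst hd
        simp only [List.getD_cons_succ, List.getD_cons_zero]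
        rw [if_neg (by simp)]
        simp
      · simp only [List.getD_cons_succ, List.getD_cons_zero]
        rw [if_neg (by simp)]
        rw [if_neg (by simp [hd])]
        cases rest <;> simp [hd]
    · rw [if_pos (by simp [ha])]
      cases rest <;> simp [ha]

theorem pv_layout_eq (s : String) :
    feed_dir_and_run_segment_from_relpath s = pvLayout (PySem.Str.replace s "\\" "/") := by
  unfold feed_dir_and_run_segment_from_relpath pvLayout
  exact pv_body_eq _

-- A's running-max update step, and the runs belonging to one feed
def pvUpd (latest : PySem.Dict String String) (p : String × String) : PySem.Dict String String :=
  match latest.get? p.1 with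
  | none => latest.insert p.1 p.2
  | some cur => if cur < p.2 then latest.insert p.1 p.2 else latest

def pvRunsOf (fd : String) (ps : List (String × String)) : List String :=
  (ps.filter (fun p => p.1 == fd)).map (fun p => p.2)

theorem pv_upd_get_self (d : PySem.Dict String String) (p : String × String) :
    (pvUpd d p).get? p.1 = some (match d.get? p.1 with | none => p.2 | some cur => max cur p.2) := by
  unfold pvUpd
  cases hg : d.get? p.1 with
  | none => simp [PySem.Dict.get?_insert_self]
  | some cur =>
    dsimp only
    split_ifs with hlt
    · rw [PySem.Dict.get?_insert_self]
      simp [max_eq_right (le_of_lt hlt)]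
    · rw [hg]
      simp [max_eq_left (le_of_not_gt hlt)]

theorem pv_upd_get_ne (d : PySem.Dict String String) (p : String × String) (fd : String)
    (h : p.1 ≠ fd) : (pvUpd d p).get? fd = d.get? fd := by
  unfold pvUpd
  cases hg : d.get? p.1 with
  | none => exact PySem.Dict.get?_insert_of_ne _ _ (Ne.symm h)
  | some cur =>
    dsimp only
    split_ifs with hlt
    · exact PySem.Dict.get?_insert_of_ne _ _ (Ne.symm h)
    · rfl

theorem pv_max_append_singleton (l : List String) (r : String) :
    PySem.List.max? (l ++ [r]) (fun x => x) =
      some (match PySem.List.max? l (fun x => x) with | none => r | some c => max c r) := by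
  cases l with
  | nil => simp [PySem.List.max?]
  | cons x t =>
    rw [List.cons_append, PySem.List.max?_id_cons, PySem.List.max?_id_cons, List.foldl_append]
    simp

theorem pv_latest_get (ps : List (String × String)) (fd : String) :
    (ps.foldl pvUpd PySem.Dict.empty).get? fd = PySem.List.max? (pvRunsOf fd ps) (fun x => x) := by
  induction ps using List.reverseRecOn with
  | nil => simp [pvRunsOf, PySem.List.max?, PySem.Dict.get?_empty]
  | append_singleton ps p ih =>
    rw [List.foldl_append, List.foldl_cons, List.foldl_nil]
    by_cases hfd : p.1 = fd
    · subst hfd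
      have hruns : pvRunsOf p.1 (ps ++ [p]) = pvRunsOf p.1 ps ++ [p.2] := by simp [pvRunsOf]
      rw [hruns, pv_max_append_singleton, pv_upd_get_self, ih]
    · have hruns : pvRunsOf fd (ps ++ [p]) = pvRunsOf fd ps := by
        simp [pvRunsOf, List.filter_append, hfd]
      rw [hruns, pv_upd_get_ne _ _ _ hfd, ih]

-- a loop that skips unparsed entries is a fold over the parsed sublist
def pvSkip {A B D : Type} (f : A → Option B) (g : D → B → D) : D → A → D :=
  fun b r => match f r with | none => b | some q => g b q

theorem pv_foldl_filterMap {A B D : Type} (f : A → Option B) (g : D → B → D)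
    (xs : List A) (init : D) :
    xs.foldl (pvSkip f g) init = (xs.filterMap f).foldl g init := by
  induction xs generalizing init with
  | nil => rfl
  | cons x t ih =>
    cases hx : f x <;> simp [pvSkip, hx, ih]

theorem pv_zip_map {A B : Type} (f : A → B) (l : List A) :
    l.zip (l.map f) = l.map (fun a => (a, f a)) := by
  induction l with
  | nil => rfl
  | cons x t ih => simp [ih]

-- main equivalence, over the already-normalized list of paths
theorem pv_main (rels : List String) (hn : ∀ r ∈ rels, PySem.Str.replace r "\\" "/" = r) :
    (rels.foldl (fun kept rel =>
      match feed_dir_and_run_segment_from_relpath rel with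
      | none => PySem.Set.add kept rel
      | some (feed_dir, run_seg) =>
        match (latest_run_segment_by_feed_dir rels).get? feed_dir with
        | none => PySem.Set.add kept rel
        | some want => if run_seg = want then PySem.Set.add kept rel else kept)
      (PySem.Set.empty : PySem.Set String))
    =
    ((rels.zip (rels.map pvLayout)).foldl (fun kept rm =>
      match rm.2 with
      | none => PySem.Set.add kept rm.1
      | some m =>
        if (rels.map pvLayout).any (fun o => match o with
            | some p => p.1 == m.1 && m.2 < p.2
            | none => false)
        then kept else PySem.Set.add kept rm.1)
      (PySem.Set.empty : PySem.Set String)) := by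
  have hparse : ∀ r ∈ rels, feed_dir_and_run_segment_from_relpath r = pvLayout r := by
    intro r hr; rw [pv_layout_eq, hn r hr]
  set ps : List (String × String) := rels.filterMap pvLayout with hps
  -- A's latest dict is the running max over the parsed pairs
  have hlatest : latest_run_segment_by_feed_dir rels = ps.foldl pvUpd PySem.Dict.empty := by
    unfold latest_run_segment_by_feed_dir
    rw [PySem.List.foldl_congr_mem rels _ (pvSkip pvLayout pvUpd) _
      (by
        intro acc r hr
        rw [pv_layout_eq, pv_replace_idem, hn r hr]
        simp only [pvSkip]
        cases hp : pvLayout r with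
        | none => rfl
        | some q => cases q; simp [pvUpd])]
    rw [hps]
    exact pv_foldl_filterMap pvLayout pvUpd rels _
  -- fold B over rels directly
  rw [pv_zip_map, List.foldl_map]
  apply PySem.List.foldl_congr_mem
  intro acc r hr
  rw [hparse r hr]
  dsimp only
  cases hp : pvLayout r with
  | none => rfl
  | some q =>
    obtain ⟨fd, rs⟩ := q
    dsimp only
    have hmem : (fd, rs) ∈ ps := by
      rw [hps]; exact List.mem_filterMap.mpr ⟨r, hr, hp⟩
    have hrs : rs ∈ pvRunsOf fd ps := by
      unfold pvRunsOf
      exact List.mem_map.mpr ⟨(fd, rs), List.mem_filter.mpr ⟨hmem, by simp⟩, rfl⟩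
    rw [hlatest, pv_latest_get]
    cases hm : PySem.List.max? (pvRunsOf fd ps) (fun x => x) with
    | none =>
      exact absurd ((PySem.List.max?_eq_none_iff _ _).mp hm ▸ hrs) (List.not_mem_nil)
    | some want =>
      have hwmem : want ∈ pvRunsOf fd ps := PySem.List.max?_mem hm
      have hle : ∀ y ∈ pvRunsOf fd ps, y ≤ want := PySem.List.max?_isMax hm
      -- B's dominance test holds iff rs is not the maximum
      have hany : ((rels.map pvLayout).any (fun o => match o with
            | some p => p.1 == fd && rs < p.2
            | none => false)) = decide (rs ≠ want) := by
        have hex : ((rels.map pvLayout).any (fun o => match o with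
              | some p => p.1 == fd && rs < p.2
              | none => false)) = true ↔ ∃ p ∈ ps, p.1 = fd ∧ rs < p.2 := by
          rw [List.any_map, List.any_eq_true]
          constructor
          · rintro ⟨x, hx, hfx⟩
            cases hpx : pvLayout x with
            | none => rw [Function.comp_apply, hpx] at hfx; exact absurd hfx (by simp)
            | some p =>
              rw [Function.comp_apply, hpx] at hfx
              refine ⟨p, ?_, ?_⟩
              · rw [hps]; exact List.mem_filterMap.mpr ⟨x, hx, hpx⟩
              · simpa using hfx
          · rintro ⟨p, hpmem, hp1, hp2⟩
            rw [hps] at hpmem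
            obtain ⟨x, hx, hpx⟩ := List.mem_filterMap.mp hpmem
            refine ⟨x, hx, ?_⟩
            rw [Function.comp_apply, hpx]
            simp [hp1]
            exact String.lt_iff_toList_lt.mp hp2
        by_cases hrw : rs = want
        · subst hrw
          have : ¬ ∃ p ∈ ps, p.1 = fd ∧ rs < p.2 := by
            rintro ⟨p, hpmem, hp1, hp2⟩
            have : p.2 ∈ pvRunsOf fd ps := by
              unfold pvRunsOf
              exact List.mem_map.mpr ⟨p, List.mem_filter.mpr ⟨hpmem, by simp [hp1]⟩, rfl⟩
            exact absurd hp2 (not_lt_of_ge (hle _ this))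
          simp only [decide_eq_false (by simp : ¬ rs ≠ rs)]
            
          rw [Bool.eq_false_iff]
          intro hh
          exact this (hex.mp hh)
        · have hlt : rs < want := lt_of_le_of_ne (hle _ hrs) hrw
          obtain ⟨p, hpf, hpe⟩ :
              ∃ p, p ∈ ps.filter (fun p => p.1 == fd) ∧ p.2 = want := by
            unfold pvRunsOf at hwmem
            obtain ⟨p, hpf, hpe⟩ := List.mem_map.mp hwmem
            exact ⟨p, hpf, hpe⟩
          have hpmem := (List.mem_filter.mp hpf).1
          have hp1 : p.1 = fd := by simpa using (List.mem_filter.mp hpf).2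
          rw [decide_eq_true hrw]
          exact hex.mpr ⟨p, hpmem, hp1, by rw [hpe]; exact hlt⟩
      rw [hany]
      dsimp only
      by_cases hrw : rs = want
      · simp [hrw]
      · simp [hrw]

-- ===== VERDICT (by name: the statement is the Claim_ definition above) =====
set_option maxHeartbeats 1000000 in
theorem latest_feed_run_allowed_relpaths_spec : Claim_equal_latest_feed_run_allowed_relpaths := by
  intro rel_posixes _
  unfold Spec_latest_feed_run_allowed_relpaths
  show latest_feed_run_allowed_relpaths rel_posixes = latest_feed_run_allowed_relpaths_alt rel_posixes
  simp only [latest_feed_run_allowed_relpaths, latest_feed_run_allowed_relpaths_alt]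
  exact pv_main (rel_posixes.map (fun r => PySem.Str.replace r "\\" "/"))
    (by intro r hr; obtain ⟨r0, _, rfl⟩ := List.mem_map.mp hr; exact pv_replace_idem r0)
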